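-- pv_equiv track=rewrite | github.com/learningmatter-mit/NeuralForceField | examples/data_gathering.py | is_isomer
-- ===== SOURCE A (Python) =====
-- def is_isomer(sm1, sm2):
--     """Determines if two smiles strings are cis-trans isomers."""
--
--     array = [e1 == e2 for e1, e2 in zip(sm1, sm2)]
--     true_array = list(filter(lambda x: x==True, array ))
--     if len(true_array) != len(array)-1:
--         return False
--     false_index = [index for index, item in enumerate(array) if not item][0]
--     char1 = sm1[false_index]
--     char2 = sm2[false_index]
--     return sorted([char1, char2]) == ["/", "\\"]
-- ===== SOURCE B (Python) =====
-- def is_isomer(sm1, sm2):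
--     """Determines if two smiles strings are cis-trans isomers."""
--     n = min(len(sm1), len(sm2))
--     i = 0
--     while i < n and sm1[i] == sm2[i]:
--         i += 1
--     if i == n:
--         return False
--     if (sm1[i], sm2[i]) not in (('/', '\\'), ('\\', '/')):
--         return False
--     return sm1[i + 1:n] == sm2[i + 1:n]
-- ===== Notes on version B (the rewrite author's own statement) =====
-- stated objective: simpler
-- what changed: B finds the first mismatching position by skipping the common prefix, checks that single pair is ('/','\') or ('\','/') by tuple membership instead of sorting, and decides 'exactly one mismatch' by comparing the remaining suffix slices for equality -- no equality list, no filter/count of mismatches, no enumerate/index pass.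
import Mathlib
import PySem

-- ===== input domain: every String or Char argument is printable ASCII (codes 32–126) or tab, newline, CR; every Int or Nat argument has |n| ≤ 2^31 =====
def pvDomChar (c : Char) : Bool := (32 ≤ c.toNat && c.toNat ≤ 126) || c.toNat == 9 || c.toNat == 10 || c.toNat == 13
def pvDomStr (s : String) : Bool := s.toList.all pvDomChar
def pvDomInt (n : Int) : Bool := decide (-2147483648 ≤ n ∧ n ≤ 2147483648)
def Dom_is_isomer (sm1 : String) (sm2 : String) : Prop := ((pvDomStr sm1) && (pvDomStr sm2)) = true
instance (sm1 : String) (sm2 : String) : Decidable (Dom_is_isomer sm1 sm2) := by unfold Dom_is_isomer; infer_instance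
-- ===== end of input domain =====

-- B skips the common prefix to the first mismatching position, checks that pair is
-- ('/','\') or ('\','/'), and decides "no further mismatch" by comparing the remaining
-- suffix slices for equality — no equality list, no filter/count, no enumerate: simpler.

-- ===== PORT A =====
def is_isomer (sm1 : String) (sm2 : String) : Bool :=
  let array := (List.zip sm1.toList sm2.toList).map (fun p => p.1 == p.2)
  let true_array := array.filter (fun x => x == true)
  if (true_array.length : Int) ≠ (array.length : Int) - 1 then false
  else
    -- [index for index, item in enumerate(array) if not item][0]; the [0] would raise
    -- IndexError on an empty list, unreachable under the guard (match's [] arm)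
    match ((PySem.List.enumerate array 0).filter (fun p => !p.2)).map (fun p => p.1) with
    | [] => false
    | i :: _ =>
      match PySem.List.pyGet? sm1.toList i, PySem.List.pyGet? sm2.toList i with
      | some c1, some c2 => PySem.List.sorted [c1, c2] (fun x => x) false == ['/', '\\']
      | _, _ => false

-- ===== PORT B =====
-- the while loop advancing i past the common prefix, as structural recursion on the
-- two character lists; sm1[i+1:n] == sm2[i+1:n] (n = min length) is the take-equality
def is_isomer_alt_go : List Char → List Char → Bool
  | c1 :: t1, c2 :: t2 =>
    if c1 == c2 then is_isomer_alt_go t1 t2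
    else if !((c1 == '/' && c2 == '\\') || (c1 == '\\' && c2 == '/')) then false
    else t1.take (min t1.length t2.length) == t2.take (min t1.length t2.length)
  | _, _ => false    -- i == n: no mismatch within the overlap

def is_isomer_alt (sm1 : String) (sm2 : String) : Bool :=
  is_isomer_alt_go sm1.toList sm2.toList

-- ===== PRECONDITION & SPEC =====
def Spec_is_isomer (sm1 : String) (sm2 : String) (out : Bool) : Prop := out = is_isomer_alt sm1 sm2
instance (sm1 : String) (sm2 : String) (out : Bool) : Decidable (Spec_is_isomer sm1 sm2 out) := by unfold Spec_is_isomer; infer_instance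

-- ===== CLAIM =====
def Claim_equal_is_isomer : Prop := ∀ (sm1 : String) (sm2 : String), Dom_is_isomer sm1 sm2 → Spec_is_isomer sm1 sm2 (is_isomer sm1 sm2)

-- ===== LEMMAS AND PROOFS =====

-- shared target: both programs compute this function of the zipped character lists
def pvCheck (p : Char × Char) : Bool :=
  (p.1 == '/' && p.2 == '\\') || (p.1 == '\\' && p.2 == '/')

def pvSpecFun (l : List (Char × Char)) : Bool :=
  match l.filter (fun p => p.1 != p.2) with
  | [p] => pvCheck p
  | _ => false

theorem sorted_pair_eq (c1 c2 : Char) :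
    (PySem.List.sorted [c1, c2] (fun x => x) false == ['/', '\\'])
      = pvCheck (c1, c2) := by
  simp only [pvCheck]
  rw [PySem.List.sorted_eq_foldl_insertBy]
  simp only [List.foldl, PySem.List.insertBy]
  by_cases h : (c2 < c1)
  · simp only [h, decide_true]
    show (([c2, c1] : List Char) == ['/', '\\']) = _
    have h2 : ¬ (c1 = '/' ∧ c2 = '\\') := by
      rintro ⟨rfl, rfl⟩; exact absurd h (by decide)
    rw [Bool.eq_iff_iff]
    simp only [beq_iff_eq, Bool.or_eq_true, Bool.and_eq_true, List.cons.injEq, and_true]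
    tauto
  · simp only [h, decide_false]
    show (([c1, c2] : List Char) == ['/', '\\']) = _
    have h1 : ¬ (c1 = '\\' ∧ c2 = '/') := by
      rintro ⟨rfl, rfl⟩; exact h (by decide)
    rw [Bool.eq_iff_iff]
    simp only [beq_iff_eq, Bool.or_eq_true, Bool.and_eq_true, List.cons.injEq, and_true]
    tauto

theorem filter_zip_nil_iff (t1 t2 : List Char) :
    ((t1.zip t2).filter (fun p => p.1 != p.2) = []) ↔
      t1.take (min t1.length t2.length) = t2.take (min t1.length t2.length) := by
  induction t1 generalizing t2 with
  | nil => simp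
  | cons a s1 ih =>
    cases t2 with
    | nil => simp
    | cons b s2 =>
      have hmin : min (s1.length + 1) (s2.length + 1) = min s1.length s2.length + 1 := by omega
      simp only [List.zip_cons_cons, List.filter_cons, List.length_cons, hmin,
        List.take_succ_cons]
      by_cases hab : a = b
      · subst hab
        simp only [bne_self_eq_false, Bool.false_eq_true, if_false, ih,
          List.cons.injEq, true_and]
      · have hb : (a != b) = true := bne_iff_ne.mpr hab
        simp only [hb, if_true, List.cons.injEq]
        constructor
        · intro h; cases h
        · intro h; exact absurd h.1 hab

theorem go_eq_spec (l1 l2 : List Char) :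
    is_isomer_alt_go l1 l2 = pvSpecFun (l1.zip l2) := by
  induction l1 generalizing l2 with
  | nil => cases l2 <;> rfl
  | cons c1 t1 ih =>
    cases l2 with
    | nil => rfl
    | cons c2 t2 =>
      rw [is_isomer_alt_go]
      by_cases h : c1 = c2
      · subst h
        simp only [beq_self_eq_true, if_true, ih, pvSpecFun, List.zip_cons_cons,
          List.filter_cons, bne_self_eq_false, Bool.false_eq_true, if_false]
      · have hne : (c1 == c2) = false := beq_eq_false_iff_ne.mpr h
        have hb : (c1 != c2) = true := bne_iff_ne.mpr h
        simp only [hne, Bool.false_eq_true, if_false, pvSpecFun, List.zip_cons_cons,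
          List.filter_cons, hb, if_true]
        by_cases hc : ((c1 == '/' && c2 == '\\') || (c1 == '\\' && c2 == '/')) = true
        · simp only [hc, Bool.not_true, Bool.false_eq_true, if_false]
          cases hrest : (t1.zip t2).filter (fun p => p.1 != p.2) with
          | nil =>
            have := (filter_zip_nil_iff t1 t2).mp hrest
            simp [this, pvCheck, hc]
          | cons q rest2 =>
            have : ¬ (t1.take (min t1.length t2.length) = t2.take (min t1.length t2.length)) := by
              intro he
              rw [(filter_zip_nil_iff t1 t2).mpr he] at hrest
              cases hrest
            simp [this]
        · have hcf : ((c1 == '/' && c2 == '\\') || (c1 == '\\' && c2 == '/')) = false :=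
            Bool.not_eq_true _ ▸ (by simpa using hc)
          simp only [hcf, Bool.not_false, if_true]
          cases hrest : (t1.zip t2).filter (fun p => p.1 != p.2) with
          | nil => simp [pvCheck, hcf]
          | cons q rest2 => rfl

theorem alt_eq_spec (sm1 sm2 : String) :
    is_isomer_alt sm1 sm2 = pvSpecFun (sm1.toList.zip sm2.toList) := by
  rw [is_isomer_alt, go_eq_spec]

theorem enumerate_map (f : (Char × Char) → Bool) (l : List (Char × Char)) (s : Int) :
    PySem.List.enumerate (l.map f) s = (PySem.List.enumerate l s).map (fun q => (q.1, f q.2)) := by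
  induction l generalizing s with
  | nil => simp [PySem.List.enumerate_nil]
  | cons a t ih => simp [PySem.List.enumerate_cons, ih]

theorem a_eq_spec (sm1 sm2 : String) :
    is_isomer sm1 sm2 = pvSpecFun (sm1.toList.zip sm2.toList) := by
  unfold is_isomer pvSpecFun
  simp only [bne]
  set l1 := sm1.toList with hl1
  set l2 := sm2.toList with hl2
  set l := l1.zip l2 with hl
  set m := l.filter (fun p => !(p.1 == p.2)) with hmdef
  have hlen : ((l.map (fun p => p.1 == p.2)).filter (fun x => x == true)).length
      = (l.filter (fun p => p.1 == p.2)).length := by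
    rw [List.filter_map, List.length_map]
    have hc : ((fun x => x == true) ∘ fun (p : Char × Char) => p.1 == p.2)
        = fun (p : Char × Char) => p.1 == p.2 := by funext p; simp [Function.comp]
    rw [hc]
  have hsum : (l.filter (fun p => p.1 == p.2)).length + m.length = l.length := by
    have := List.length_eq_length_filter_add (l := l) (f := fun (p : Char × Char) => p.1 == p.2)
    rw [hmdef]
    simpa using this.symm
  by_cases h1 : m.length = 1
  · -- exactly one mismatch: the guard passes and A reads the mismatching characters back
    obtain ⟨p, hp⟩ := List.length_eq_one_iff.mp h1
    rw [List.length_map, if_neg (not_not.mpr (by rw [hlen]; omega))]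
    rw [enumerate_map, List.filter_map, List.map_map]
    have hpred : ((fun (p : Int × Bool) => !p.2) ∘ fun (q : Int × (Char × Char)) => (q.1, q.2.1 == q.2.2))
        = fun (q : Int × (Char × Char)) => !(q.2.1 == q.2.2) := by funext q; rfl
    rw [hpred]
    set F := (PySem.List.enumerate l 0).filter (fun q => !(q.2.1 == q.2.2)) with hF
    have hsnd : F.map (fun q => q.2) = m := by
      have hc : (fun (q : Int × (Char × Char)) => !(q.2.1 == q.2.2))
          = ((fun (p : Char × Char) => !(p.1 == p.2)) ∘ fun (q : Int × (Char × Char)) => q.2) := rfl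
      rw [hF, hc, ← List.filter_map, PySem.List.map_snd_enumerate, hmdef]
    rw [hp] at hsnd
    obtain ⟨q, hq⟩ : ∃ q, F = [q] := by
      cases hFc : F with
      | nil => rw [hFc] at hsnd; simp at hsnd
      | cons q rest =>
        rw [hFc] at hsnd; simp at hsnd
        exact ⟨q, by rw [hsnd.2]⟩
    have hq2 : q.2 = p := by rw [hq] at hsnd; simpa using hsnd
    have hqmem : q ∈ PySem.List.enumerate l 0 := by
      have hqF : q ∈ F := by rw [hq]; exact List.mem_cons_self
      rw [hF] at hqF
      exact List.mem_of_mem_filter hqF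
    rw [PySem.List.mem_enumerate_iff] at hqmem
    obtain ⟨k, hk, hqk⟩ := hqmem
    have hll : l.length = min l1.length l2.length := List.length_zip
    have hk1 : k < l1.length := by omega
    have hk2 : k < l2.length := by omega
    have hlk : l[k] = (l1[k], l2[k]) := List.getElem_zip
    have hq1 : q.1 = (k : Int) := by rw [hqk]; simp
    have hpval : p = (l1[k], l2[k]) := by rw [← hq2, hqk]; simpa using hlk
    rw [hq]
    simp only [List.map_cons, List.map_nil, Function.comp_apply, hq1,
      PySem.List.pyGet?_natCast, List.getElem?_eq_getElem hk1, List.getElem?_eq_getElem hk2, hp]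
    rw [sorted_pair_eq]
    simp [hpval]
  · -- mismatch count ≠ 1: the guard fires in A, and B's spec is false too
    rw [List.length_map, if_pos (by rw [hlen]; omega)]
    clear_value m
    cases hmc : m with
    | nil => rfl
    | cons p rest =>
      cases rest with
      | nil => rw [hmc] at h1; simp at h1
      | cons q rest2 => rfl

-- ===== VERDICT =====
theorem is_isomer_spec : Claim_equal_is_isomer := by
  intro sm1 sm2 _
  unfold Spec_is_isomer
  rw [a_eq_spec, alt_eq_spec]
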